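-- pv_equiv track=rewrite | github.com/kstep/dnd-pc | scripts/split_data.py | process_effects
-- ===== SOURCE A (Python) =====
-- from collections import OrderedDict
--
-- TEXT_FIELDS = {"label", "description", "short"}
--
-- def extract_text(obj, text_fields=TEXT_FIELDS):
--     """Extract text fields from an object, returning (locale_text, cleaned_obj)."""
--     text = {}
--     for field in text_fields:
--         if field in obj:
--             val = obj[field]
--             if field == "label":
--                 # label is optional - only include if present and non-null
--                 if val is not None:
--                     text[field] = val
--             elif field == "description":
--                 # description is always a string; include if non-empty
--                 if val:
--                     text[field] = val
--             elif field == "short":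
--                 if val is not None:
--                     text[field] = val
--     return text
--
-- def strip_text(obj, text_fields=TEXT_FIELDS):
--     """Return a copy of obj without text fields."""
--     result = OrderedDict()
--     for k, v in obj.items():
--         if k == "description":
--             result[k] = ""  # keep field with empty string (required field)
--         elif k in text_fields:
--             continue  # skip optional text fields
--         else:
--             result[k] = v
--     return result
--
-- def process_effects(data):
--     """Process effects.json."""
--     locale_map = OrderedDict()
--     cleaned = []
--
--     for effect in data:
--         ename = effect.get("name", "")
--         if ename:
--             effect_text = extract_text(effect)
--             if effect_text:
--                 locale_map[ename] = effect_text
--         cleaned.append(strip_text(effect))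
--
--     return cleaned, locale_map
-- ===== SOURCE B (Python) =====
-- from collections import OrderedDict
--
--
-- def process_effects(data):
--     """Process effects.json: single pass per effect building the cleaned
--     object and capturing the text fields, then assembling the locale text."""
--     cleaned = []
--     locale_map = OrderedDict()
--     for effect in data:
--         obj = OrderedDict()
--         label = description = short = None
--         for k, v in effect.items():
--             if k == "label":
--                 label = v
--             elif k == "short":
--                 short = v
--             elif k == "description":
--                 description = v
--                 obj[k] = ""
--             else:
--                 obj[k] = v
--         cleaned.append(obj)
--         text = {}
--         if label is not None:
--             text["label"] = label
--         if description:
--             text["description"] = description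
--         if short is not None:
--             text["short"] = short
--         name = obj.get("name")
--         if name and text:
--             locale_map[name] = text
--     return cleaned, locale_map
-- ===== Notes on version B (the rewrite author's own statement) =====
-- stated objective: simpler
-- what changed: A's two helper passes per effect (extract_text iterating a field set with membership tests plus strip_text iterating the items) are merged into one pass over the items that builds the cleaned object and captures the three text fields in slots, assembling the text dict afterwards.
import Mathlib
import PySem

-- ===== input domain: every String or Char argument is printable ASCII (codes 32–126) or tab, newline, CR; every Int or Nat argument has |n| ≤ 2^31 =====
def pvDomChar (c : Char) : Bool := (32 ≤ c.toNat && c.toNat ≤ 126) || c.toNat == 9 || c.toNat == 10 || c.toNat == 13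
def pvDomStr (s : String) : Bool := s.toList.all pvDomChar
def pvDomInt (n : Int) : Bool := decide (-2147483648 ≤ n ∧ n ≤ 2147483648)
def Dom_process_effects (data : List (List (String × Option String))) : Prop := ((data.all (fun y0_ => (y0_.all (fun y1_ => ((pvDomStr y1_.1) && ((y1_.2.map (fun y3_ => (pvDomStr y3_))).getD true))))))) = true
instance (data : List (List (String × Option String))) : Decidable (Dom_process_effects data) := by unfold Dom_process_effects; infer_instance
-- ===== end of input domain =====

-- B merges A's two helper passes (extract_text over a field set + strip_text over the items) into
-- one pass over each effect's items; objective: simpler (one loop per effect, no field-set tests).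
-- Each Python dict is modelled as its association list in insertion order; the Python set literal
-- TEXT_FIELDS is iterated in its insertion order (the text dicts it orders are compared as dicts).

-- ===== PORT A =====
def pvTextFields : List String := ["label", "description", "short"]

-- extract_text(obj): loop over TEXT_FIELDS; 'field in obj' / obj[field] is the first match
-- (keys are unique under Pre_); text[field] = val on a fresh key appends.
def extract_text (obj : List (String × Option String)) : List (String × String) :=
  pvTextFields.foldl (fun text field =>
    match obj.find? (fun kv => kv.1 == field) with
    | none => text
    | some kv =>
      if field == "label" then
        match kv.2 with
        | some v => text ++ [(field, v)]
        | none => text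
      else if field == "description" then
        match kv.2 with
        | some v => if v ≠ "" then text ++ [(field, v)] else text
        | none => text
      else if field == "short" then
        match kv.2 with
        | some v => text ++ [(field, v)]
        | none => text
      else text) []

-- strip_text(obj): loop over obj.items(); result[k] = … on keys unique under Pre_ appends;
-- kv.2.getD "" is exact under Pre_ (non-text keys carry a non-None value).
def strip_text (obj : List (String × Option String)) : List (String × String) :=
  obj.foldl (fun result kv =>
    if kv.1 == "description" then result ++ [(kv.1, "")]
    else if pvTextFields.contains kv.1 then result
    else result ++ [(kv.1, kv.2.getD "")]) []

-- the body of A's 'for effect in data' loop; state = (cleaned, locale_map)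
def pvStepA (acc : List (List (String × String)) × PySem.Dict String (List (String × String)))
    (effect : List (String × Option String)) :
    List (List (String × String)) × PySem.Dict String (List (String × String)) :=
  let ename : Option String :=
    match effect.find? (fun kv => kv.1 == "name") with
    | none => some ""          -- effect.get("name", "")
    | some kv => kv.2
  let locale :=
    match ename with
    | some s =>
      if s ≠ "" then
        let effect_text := extract_text effect
        if effect_text ≠ [] then acc.2.insert s effect_text else acc.2
      else acc.2
    | none => acc.2
  (acc.1 ++ [strip_text effect], locale)

def process_effects (data : List (List (String × Option String))) : (List (List (String × String))) × (List (String × List (String × String))) :=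
  let res := data.foldl pvStepA ([], PySem.Dict.empty)
  (res.1, res.2.items)

-- ===== PORT B =====
-- 'if o is not None: text[f] = o' on a fresh key
def pvOptEntry (f : String) (o : Option String) : List (String × String) :=
  match o with
  | some v => [(f, v)]
  | none => []

-- 'if o: text[f] = o' on a fresh key
def pvOptEntryNE (f : String) (o : Option String) : List (String × String) :=
  match o with
  | some v => if v ≠ "" then [(f, v)] else []
  | none => []

-- the body of B's inner 'for k, v in effect.items()' loop; state = (obj, label, description, short);
-- obj[k] = … on keys unique under Pre_ appends; kv.2.getD "" is exact under Pre_.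
def pvStepB (st : List (String × String) × Option String × Option String × Option String)
    (kv : String × Option String) :
    List (String × String) × Option String × Option String × Option String :=
  if kv.1 == "label" then (st.1, kv.2, st.2.2.1, st.2.2.2)
  else if kv.1 == "short" then (st.1, st.2.1, st.2.2.1, kv.2)
  else if kv.1 == "description" then (st.1 ++ [(kv.1, "")], st.2.1, kv.2, st.2.2.2)
  else (st.1 ++ [(kv.1, kv.2.getD "")], st.2.1, st.2.2.1, st.2.2.2)

-- the body of B's 'for effect in data' loop; state = (cleaned, locale_map)
def pvStepBOuter (acc : List (List (String × String)) × PySem.Dict String (List (String × String)))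
    (effect : List (String × Option String)) :
    List (List (String × String)) × PySem.Dict String (List (String × String)) :=
  let st := effect.foldl pvStepB ([], none, none, none)
  let obj := st.1
  let text := pvOptEntry "label" st.2.1 ++ pvOptEntryNE "description" st.2.2.1 ++ pvOptEntry "short" st.2.2.2
  let name : Option String := (obj.find? (fun kv => kv.1 == "name")).map (fun kv => kv.2)   -- obj.get("name")
  let locale :=
    match name with
    | some n => if n ≠ "" ∧ text ≠ [] then acc.2.insert n text else acc.2
    | none => acc.2
  (acc.1 ++ [obj], locale)

def process_effects_alt (data : List (List (String × Option String))) : (List (List (String × String))) × (List (String × List (String × String))) :=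
  let res := data.foldl pvStepBOuter ([], PySem.Dict.empty)
  (res.1, res.2.items)

-- ===== PRECONDITION & SPEC =====
-- Pre_ restricts each effect to a faithful encoding of the Python dict A receives: no repeated
-- keys (which occurrence of a repeated key wins is an artefact of the association-list encoding,
-- a Python dict cannot contain one), and every key outside {label, short, description} maps to a
-- non-None value — on a None value there A returns a dict holding None where the declared return
-- type requires str.
def Pre_process_effects (data : List (List (String × Option String))) : Prop :=
  ∀ effect ∈ data, (effect.map Prod.fst).Nodup ∧
    ∀ kv ∈ effect, (kv.1 ≠ "label" ∧ kv.1 ≠ "short" ∧ kv.1 ≠ "description") → kv.2 ≠ none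
instance (data : List (List (String × Option String))) : Decidable (Pre_process_effects data) := by unfold Pre_process_effects; infer_instance

def pvWitness_process_effects : (List (List (String × Option String))) :=
  [[("name", some "fireball"), ("description", some "burns"), ("level", some "3"), ("label", none)],
   [("name", some ""), ("short", some "s")]]

def Spec_process_effects (data : List (List (String × Option String))) (out : (List (List (String × String))) × (List (String × List (String × String)))) : Prop := out = process_effects_alt data
instance (data : List (List (String × Option String))) (out : (List (List (String × String))) × (List (String × List (String × String)))) : Decidable (Spec_process_effects data out) := by unfold Spec_process_effects; infer_instance

-- ===== CLAIM (what is proved, stated in full; the proofs are below) =====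
def Claim_equal_process_effects : Prop := ∀ (data : List (List (String × Option String))), Dom_process_effects data → Pre_process_effects data → Spec_process_effects data (process_effects data)

-- ===== LEMMAS AND PROOFS =====

-- the common per-item mapping behind strip_text and B's obj accumulation
def pvStripF (kv : String × Option String) : Option (String × String) :=
  if kv.1 = "description" then some (kv.1, "")
  else if kv.1 = "label" ∨ kv.1 = "short" then none
  else some (kv.1, kv.2.getD "")

-- last assignment to slot k while scanning l (what B's overwriting slots compute)
def pvLastV (l : List (String × Option String)) (k : String) (a : Option String) : Option String :=
  l.foldl (fun a kv => if kv.1 = k then kv.2 else a) a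

theorem pvStrip_fold (l : List (String × Option String)) (acc : List (String × String)) :
    l.foldl (fun result kv =>
      if kv.1 == "description" then result ++ [(kv.1, "")]
      else if pvTextFields.contains kv.1 then result
      else result ++ [(kv.1, kv.2.getD "")]) acc = acc ++ l.filterMap pvStripF := by
  induction l generalizing acc with
  | nil => simp
  | cons kv t ih =>
    simp only [List.foldl_cons, List.filterMap_cons]
    rw [ih]
    by_cases h1 : kv.1 = "description"
    · simp [h1, pvStripF]
    · by_cases h2 : kv.1 = "label"
      · simp [h2, pvTextFields, pvStripF]
      · by_cases h3 : kv.1 = "short"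
        · simp [h3, pvTextFields, pvStripF]
        · simp [h1, h2, h3, pvTextFields, pvStripF]

theorem pvBfold (l : List (String × Option String)) (obj : List (String × String))
    (lab desc sh : Option String) :
    l.foldl pvStepB (obj, lab, desc, sh) =
      (obj ++ l.filterMap pvStripF, pvLastV l "label" lab, pvLastV l "description" desc, pvLastV l "short" sh) := by
  induction l generalizing obj lab desc sh with
  | nil => simp [pvLastV]
  | cons kv t ih =>
    simp only [List.foldl_cons, List.filterMap_cons, pvLastV, pvStepB]
    by_cases h2 : kv.1 = "label" <;> by_cases h3 : kv.1 = "short" <;>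
      by_cases h1 : kv.1 = "description" <;>
      simp_all [pvStripF, pvLastV]

theorem pvLastV_of_not_mem (l : List (String × Option String)) (k : String) (a : Option String)
    (h : k ∉ l.map Prod.fst) : pvLastV l k a = a := by
  induction l generalizing a with
  | nil => rfl
  | cons kv t ih =>
    simp only [List.map_cons, List.mem_cons, not_or] at h
    simp only [pvLastV, List.foldl_cons] at *
    rw [if_neg (fun hk => h.1 hk.symm)]
    exact ih a h.2

theorem pvLastV_nodup (l : List (String × Option String)) (k : String)
    (h : (l.map Prod.fst).Nodup) :
    pvLastV l k none = (l.find? (fun kv => kv.1 == k)).bind (fun kv => kv.2) := by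
  induction l with
  | nil => rfl
  | cons kv t ih =>
    simp only [List.map_cons, List.nodup_cons] at h
    by_cases hk : kv.1 = k
    · rw [List.find?_cons_of_pos (by simp [hk]), show pvLastV (kv :: t) k none = pvLastV t k kv.2 from by simp [pvLastV, hk]]
      exact pvLastV_of_not_mem t k kv.2 (hk ▸ h.1)
    · rw [List.find?_cons_of_neg (by simp [hk]), show pvLastV (kv :: t) k none = pvLastV t k none from by simp [pvLastV, hk]]
      exact ih h.2

theorem pvFind_strip (l : List (String × Option String)) :
    (l.filterMap pvStripF).find? (fun kv => kv.1 == "name") =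
      (l.find? (fun kv => kv.1 == "name")).map (fun kv => (kv.1, kv.2.getD "")) := by
  induction l with
  | nil => rfl
  | cons kv t ih =>
    by_cases hn : kv.1 = "name"
    · rw [List.filterMap_cons_some (show pvStripF kv = some (kv.1, kv.2.getD "") from by simp [pvStripF, hn])]
      simp only [List.find?_cons, show (kv.1 == "name") = true from by simp [hn]]
      rfl
    · have hb : (kv.1 == "name") = false := by simp [hn]
      by_cases h1 : kv.1 = "description"
      · rw [List.filterMap_cons_some (show pvStripF kv = some (kv.1, "") from by simp [pvStripF, h1])]
        simp only [List.find?_cons, hb]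
        exact ih
      · by_cases h2 : kv.1 = "label" ∨ kv.1 = "short"
        · rw [List.filterMap_cons_none (show pvStripF kv = none from by simp [pvStripF, h1, h2])]
          simp only [List.find?_cons, hb]
          exact ih
        · rw [List.filterMap_cons_some (show pvStripF kv = some (kv.1, kv.2.getD "") from by simp [pvStripF, h1, h2])]
          simp only [List.find?_cons, hb]
          exact ih

theorem pvExtract_eq (l : List (String × Option String)) :
    extract_text l =
      pvOptEntry "label" ((l.find? (fun kv => kv.1 == "label")).bind (fun kv => kv.2)) ++
      pvOptEntryNE "description" ((l.find? (fun kv => kv.1 == "description")).bind (fun kv => kv.2)) ++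
      pvOptEntry "short" ((l.find? (fun kv => kv.1 == "short")).bind (fun kv => kv.2)) := by
  rcases hL : l.find? (fun kv => kv.1 == "label") with _ | ⟨kL, vL⟩ <;>
  rcases hD : l.find? (fun kv => kv.1 == "description") with _ | ⟨kD, vD⟩ <;>
  rcases hS : l.find? (fun kv => kv.1 == "short") with _ | ⟨kS, vS⟩ <;>
  simp only [extract_text, pvTextFields, List.foldl_cons, List.foldl_nil, hL, hD, hS] <;>
  (try cases vL) <;> (try cases vD) <;> (try cases vS) <;>
  simp [pvOptEntry, pvOptEntryNE] <;> split_ifs <;> simp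

theorem pvStep_eq (effect : List (String × Option String))
    (h1 : (effect.map Prod.fst).Nodup)
    (h2 : ∀ kv ∈ effect, (kv.1 ≠ "label" ∧ kv.1 ≠ "short" ∧ kv.1 ≠ "description") → kv.2 ≠ none)
    (acc : List (List (String × String)) × PySem.Dict String (List (String × String))) :
    pvStepA acc effect = pvStepBOuter acc effect := by
  have hstrip : strip_text effect = effect.filterMap pvStripF := by
    unfold strip_text; rw [pvStrip_fold]; simp
  rcases hf : effect.find? (fun kv => kv.1 == "name") with _ | ⟨k, v⟩
  · simp only [pvStepA, pvStepBOuter, pvBfold, hstrip, List.nil_append, pvFind_strip, hf,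
      Option.map_none]
    simp
  · have hk : k = "name" := by
      have := List.find?_some hf; simpa using this
    have hv : v ≠ none := h2 (k, v) (List.mem_of_find?_eq_some hf) (by simp [hk])
    rcases v with _ | s
    · exact absurd rfl hv
    · simp only [pvStepA, pvStepBOuter, pvBfold, hstrip, List.nil_append, pvFind_strip, hf,
        Option.map_some, pvLastV_nodup _ _ h1, pvExtract_eq, Option.getD_some]
      by_cases hs : s = "" <;> simp [hs]

-- ===== VERDICT (by name: the statement is the Claim_ definition above) =====
theorem process_effects_spec : Claim_equal_process_effects := by
  intro data _ hpre
  unfold Spec_process_effects process_effects process_effects_alt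
  have : data.foldl pvStepA ([], PySem.Dict.empty) = data.foldl pvStepBOuter ([], PySem.Dict.empty) := by
    apply PySem.List.foldl_congr_mem
    intro acc e he
    exact pvStep_eq e (hpre e he).1 (hpre e he).2 acc
  rw [this]
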